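-- pv_equiv track=rewrite | github.com/shraysidubey/pythonScripts | lower_upper_prob.py | solve
-- ===== SOURCE A (Python) =====
-- def sanitize_result(list):
-- 		rslt = []
-- 		for i in list:
-- 				x,y = i.split("->")
-- 				if x == y:
-- 					rslt.append(x)
-- 				else:
-- 					rslt.append(i)
-- 		return rslt
--
-- def solve(input_list, lower, upper):
-- 		# assuming list is already sorted
-- 		help_list = []
-- 		for i in input_list:
-- 				if i >= lower and i<=upper:
-- 						help_list.append(i)
--
-- 		if len(help_list)==0 :
-- 				rslt_list =  [str(lower) + "->" + str(upper)]
-- 				return sanitize_result(rslt_list)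
--
-- 		result = []
-- 		if help_list[0] > lower:
-- 				result.append(str(lower) + "->" + str(help_list[0]-1))
--
-- 		for i in range(1,len(help_list)):
-- 				if help_list[i] - help_list[i-1] > 1: # if diff is more than 1
-- 						result.append(str(help_list[i-1]+1) + "->" + str(help_list[i]-1))
--
-- 		if help_list[len(help_list)-1] != upper:
-- 				result.append(str(help_list[len(help_list)-1]+1) + "->" + str(upper))
--
-- 		return sanitize_result(result)
-- ===== SOURCE B (Python) =====
-- def _fmt(a, b):
--     # render the inclusive range [a, b] the way the final output shows it
--     return str(a) if a == b else str(a) + "->" + str(b)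
--
-- def solve(input_list, lower, upper):
--     # one fused pass: walk the list keeping the last in-range value seen,
--     # emitting each missing stretch directly in its final form
--     prev = lower - 1
--     out = []
--     for v in input_list:
--         if lower <= v <= upper:
--             if v - prev > 1:
--                 out.append(_fmt(prev + 1, v - 1))
--             prev = v
--     if prev == lower - 1:          # nothing of [lower, upper] was present
--         return [_fmt(lower, upper)]
--     if prev != upper:
--         out.append(_fmt(prev + 1, upper))
--     return out
-- ===== Notes on version B (the rewrite author's own statement) =====
-- stated objective: simpler
-- what changed: Replaces A's four phases (filter into help_list, three separate gap-emitting passes with index arithmetic, then a sanitize pass that re-splits every emitted string on '->') by one fused pass that tracks the last in-range value seen and emits each missing stretch directly in its final form, so no intermediate list is built and no string is ever re-parsed.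
import Mathlib
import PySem

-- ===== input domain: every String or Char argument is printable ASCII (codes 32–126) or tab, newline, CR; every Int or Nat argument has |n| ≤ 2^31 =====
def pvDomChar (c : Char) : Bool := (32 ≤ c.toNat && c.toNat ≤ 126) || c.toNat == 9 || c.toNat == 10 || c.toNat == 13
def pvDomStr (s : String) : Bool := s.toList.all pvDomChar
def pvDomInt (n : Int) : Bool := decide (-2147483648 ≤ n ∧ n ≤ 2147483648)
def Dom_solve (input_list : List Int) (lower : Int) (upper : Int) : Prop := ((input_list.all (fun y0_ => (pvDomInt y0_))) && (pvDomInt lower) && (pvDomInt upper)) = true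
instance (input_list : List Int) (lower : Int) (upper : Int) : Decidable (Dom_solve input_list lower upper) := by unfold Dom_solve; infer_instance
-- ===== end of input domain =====

-- B replaces A's filter + three gap passes + string-re-splitting sanitize by one fused pass
-- that emits each missing stretch directly in its final form (objective: simpler).

-- Python's 'a + b' on strings, exact (built on List Char so the kernel can reduce it)
def pyCat (a b : String) : String := String.ofList (a.toList ++ b.toList)

-- ===== PORT A =====
-- str(a) + "->" + str(b), the string A builds at each of its four append sites
def rawRange (a b : Int) : String := pyCat (pyCat (PySem.Int.toStr a) "->") (PySem.Int.toStr b)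

def sanitize_result (list : List String) : List String :=
  list.foldl (fun rslt i =>
    -- x, y = i.split("->"): every string reaching sanitize_result contains exactly one "->",
    -- so the 2-unpack succeeds; ported as reading parts 0 and 1 (exact on those inputs)
    let parts := (PySem.Str.split? i "->").getD []
    let x := PySem.List.pyGetD parts 0 ""
    let y := PySem.List.pyGetD parts 1 ""
    if x = y then rslt ++ [x] else rslt ++ [i]) []

def solve (input_list : List Int) (lower : Int) (upper : Int) : List String :=
  let help_list := input_list.foldl (fun h i => if lower ≤ i ∧ i ≤ upper then h ++ [i] else h) []
  if help_list.length = 0 then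
    sanitize_result [rawRange lower upper]
  else
    let result : List String :=
      if PySem.List.pyGetD help_list 0 0 > lower then
        [rawRange lower (PySem.List.pyGetD help_list 0 0 - 1)]
      else []
    let result := (PySem.List.pyRange 1 (PySem.List.len help_list) 1).foldl
      (fun res i =>
        if PySem.List.pyGetD help_list i 0 - PySem.List.pyGetD help_list (i - 1) 0 > 1 then
          res ++ [rawRange (PySem.List.pyGetD help_list (i - 1) 0 + 1) (PySem.List.pyGetD help_list i 0 - 1)]
        else res) result
    let result := if PySem.List.pyGetD help_list (PySem.List.len help_list - 1) 0 ≠ upper then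
        result ++ [rawRange (PySem.List.pyGetD help_list (PySem.List.len help_list - 1) 0 + 1) upper]
      else result
    sanitize_result result

-- ===== PORT B =====
-- str(a) if a == b else str(a) + "->" + str(b)
def fmtRange (a b : Int) : String :=
  if a = b then PySem.Int.toStr a else pyCat (pyCat (PySem.Int.toStr a) "->") (PySem.Int.toStr b)

def solve_alt (input_list : List Int) (lower : Int) (upper : Int) : List String :=
  let st := input_list.foldl (fun (st : Int × List String) v =>
      if lower ≤ v ∧ v ≤ upper then
        (v, if v - st.1 > 1 then st.2 ++ [fmtRange (st.1 + 1) (v - 1)] else st.2)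
      else st) (lower - 1, ([] : List String))
  if st.1 = lower - 1 then [fmtRange lower upper]
  else if st.1 ≠ upper then st.2 ++ [fmtRange (st.1 + 1) upper] else st.2

-- ===== PRECONDITION & SPEC =====
def Spec_solve (input_list : List Int) (lower : Int) (upper : Int) (out : List String) : Prop := out = solve_alt input_list lower upper
instance (input_list : List Int) (lower : Int) (upper : Int) (out : List String) : Decidable (Spec_solve input_list lower upper out) := by unfold Spec_solve; infer_instance

-- ===== CLAIM (what is proved, stated in full; the proofs are below) =====
def Claim_equal_solve : Prop := ∀ (input_list : List Int) (lower : Int) (upper : Int), Dom_solve input_list lower upper → Spec_solve input_list lower upper (solve input_list lower upper)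

-- ===== LEMMAS AND PROOFS =====

-- every character str(n) is made of is a digit or the leading '-'
theorem digitChar_isDigit (k : Nat) (hk : k < 10) : (Nat.digitChar k).isDigit = true := by
  interval_cases k <;> decide

theorem toDigits_all_digit (n : Nat) : ∀ c ∈ Nat.toDigits 10 n, c.isDigit = true := by
  induction n using Nat.strong_induction_on with
  | _ n ih =>
    rw [Nat.toDigits_eq_if (by omega)]
    split
    · intro c hc
      simp only [List.mem_singleton] at hc
      subst hc; exact digitChar_isDigit n (by omega)
    · intro c hc
      rcases List.mem_append.mp hc with h | h
      · exact ih (n / 10) (by omega) c h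
      · simp only [List.mem_singleton] at h
        subst h; exact digitChar_isDigit (n % 10) (by omega)

theorem toDigits_ne_nil (n : Nat) : Nat.toDigits 10 n ≠ [] := by
  rw [Nat.toDigits_eq_if (by omega)]
  split <;> simp

theorem digitChar_inj (x y : Nat) (hx : x < 10) (hy : y < 10) (h : Nat.digitChar x = Nat.digitChar y) : x = y := by
  interval_cases x <;> interval_cases y <;> first | rfl | (exfalso; exact absurd h (by decide))

theorem toDigits_inj (a : Nat) : ∀ b, Nat.toDigits 10 a = Nat.toDigits 10 b → a = b := by
  induction a using Nat.strong_induction_on with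
  | _ a ih =>
    intro b h
    have h10 : (1:Nat) < 10 := by omega
    rw [Nat.toDigits_eq_if (b := 10) (n := a) h10, Nat.toDigits_eq_if (b := 10) (n := b) h10] at h
    by_cases ha : a < 10 <;> by_cases hb : b < 10
    · rw [if_pos ha, if_pos hb] at h
      exact digitChar_inj a b ha hb (by simpa using h)
    · rw [if_pos ha, if_neg hb] at h
      have hlen := congrArg List.length h
      simp at hlen
      exact absurd hlen (toDigits_ne_nil (b / 10))
    · rw [if_neg ha, if_pos hb] at h
      have hlen := congrArg List.length h
      simp at hlen
      exact absurd hlen (toDigits_ne_nil (a / 10))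
    · rw [if_neg ha, if_neg hb] at h
      rw [← List.concat_eq_append, ← List.concat_eq_append] at h
      rcases List.concat_inj.mp h with ⟨h1, h2⟩
      have hq : a / 10 = b / 10 := ih (a / 10) (by omega) (b / 10) h1
      have hr : a % 10 = b % 10 := digitChar_inj _ _ (by omega) (by omega) h2
      omega

theorem dash_not_mem_toDigits (n : Nat) : '-' ∉ Nat.toDigits 10 n := by
  intro h
  have := toDigits_all_digit n '-' h
  simp [Char.isDigit] at this

theorem gt_not_mem_toChars (n : Int) : '>' ∉ PySem.Int.toChars n := by
  unfold PySem.Int.toChars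
  split
  · intro h
    rcases List.mem_cons.mp h with h | h
    · exact absurd h (by decide)
    · have := toDigits_all_digit n.natAbs '>' h
      simp [Char.isDigit] at this
  · intro h
    have := toDigits_all_digit n.toNat '>' h
    simp [Char.isDigit] at this

theorem toChars_inj (a b : Int) (h : PySem.Int.toChars a = PySem.Int.toChars b) : a = b := by
  unfold PySem.Int.toChars at h
  split_ifs at h with ha hb1 hb2
  · have := toDigits_inj a.natAbs b.natAbs (by simpa using h)
    omega
  · exfalso
    have : '-' ∈ Nat.toDigits 10 b.toNat := h ▸ List.mem_cons_self
    exact dash_not_mem_toDigits _ this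
  · exfalso
    have : '-' ∈ Nat.toDigits 10 a.toNat := h.symm ▸ List.mem_cons_self
    exact dash_not_mem_toDigits _ this
  · have := toDigits_inj a.toNat b.toNat h
    omega

-- splitOn of x ++ "->" ++ y when '>' occurs in neither side
theorem go_tail (y : List Char) (hy : '>' ∉ y) :
    ∀ (fuel : Nat) (cur : List Char) (acc : List (List Char)),
      PySem.Chars.splitOn.go ['-', '>'] fuel y cur acc = ((cur.reverse ++ y) :: acc).reverse := by
  induction y with
  | nil =>
    intro fuel cur acc
    cases fuel <;> simp [PySem.Chars.splitOn.go]
  | cons c t ih =>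
    intro fuel cur acc
    cases fuel with
    | zero => simp [PySem.Chars.splitOn.go]
    | succ f =>
      have hpf : List.isPrefixOf ['-', '>'] (c :: t) = false := by
        cases t with
        | nil => simp [List.isPrefixOf]
        | cons d t' =>
          have hd : d ≠ '>' := fun hd => hy (by simp [hd])
          simp [List.isPrefixOf]
          exact fun _ hdd => hd hdd.symm
      rw [PySem.Chars.splitOn.go]
      simp only [hpf, Bool.false_eq_true, if_false]
      rw [ih (fun hc => hy (List.mem_cons_of_mem _ hc)) f (c :: cur) acc]
      simp

theorem go_walk (x : List Char) (hx : '>' ∉ x) (y : List Char) :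
    ∀ (fuel : Nat) (cur : List Char) (acc : List (List Char)), x.length < fuel →
      PySem.Chars.splitOn.go ['-', '>'] fuel (x ++ '-' :: '>' :: y) cur acc
        = PySem.Chars.splitOn.go ['-', '>'] (fuel - x.length) ('-' :: '>' :: y) (x.reverse ++ cur) acc := by
  induction x with
  | nil => intro fuel cur acc h; simp
  | cons c t ih =>
    intro fuel cur acc h
    cases fuel with
    | zero => omega
    | succ f =>
      have hpf : List.isPrefixOf ['-', '>'] (c :: (t ++ '-' :: '>' :: y)) = false := by
        cases t with
        | nil =>
          simp [List.isPrefixOf]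
        | cons d t' =>
          have hd : d ≠ '>' := fun hd => hx (by simp [hd])
          simp [List.isPrefixOf]
          exact fun _ hdd => hd hdd.symm
      rw [List.cons_append, PySem.Chars.splitOn.go]
      simp only [hpf, Bool.false_eq_true, if_false]
      rw [ih (fun hc => hx (List.mem_cons_of_mem _ hc)) f (c :: cur) acc (by simpa using Nat.lt_of_succ_lt_succ h)]
      simp

theorem splitOn_clean (x y : List Char) (hx : '>' ∉ x) (hy : '>' ∉ y) :
    PySem.Chars.splitOn (x ++ '-' :: '>' :: y) ['-', '>'] = [x, y] := by
  unfold PySem.Chars.splitOn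
  rw [go_walk x hx y _ [] [] (by simp)]
  have hfuel : (x ++ '-' :: '>' :: y).length + 1 - x.length = y.length + 3 := by simp; omega
  rw [hfuel]
  rw [PySem.Chars.splitOn.go]
  have hpf : List.isPrefixOf ['-', '>'] ('-' :: '>' :: y) = true := by simp [List.isPrefixOf]
  simp only [hpf, if_true]
  have hdrop : List.drop (['-', '>'].length) ('-' :: '>' :: y) = y := rfl
  rw [hdrop, go_tail y hy _ [] _]
  simp

-- one step of sanitize_result on a single string
def sanOne (i : String) : List String :=
  let parts := (PySem.Str.split? i "->").getD []
  let x := PySem.List.pyGetD parts 0 ""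
  let y := PySem.List.pyGetD parts 1 ""
  if x = y then [x] else [i]

theorem sanitize_eq_flatMap : ∀ (l : List String) (acc : List String),
    l.foldl (fun rslt i =>
      let parts := (PySem.Str.split? i "->").getD []
      let x := PySem.List.pyGetD parts 0 ""
      let y := PySem.List.pyGetD parts 1 ""
      if x = y then rslt ++ [x] else rslt ++ [i]) acc = acc ++ l.flatMap sanOne := by
  intro l
  induction l with
  | nil => intro acc; simp
  | cons s t ih =>
    intro acc
    simp only [List.foldl_cons, List.flatMap_cons]
    rw [ih]
    simp only [sanOne]
    split <;> simp

theorem sanitize_result_eq (l : List String) : sanitize_result l = l.flatMap sanOne := by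
  unfold sanitize_result
  rw [sanitize_eq_flatMap]
  simp

theorem sanOne_raw (a b : Int) : sanOne (rawRange a b) = [fmtRange a b] := by
  have htl : (rawRange a b).toList = PySem.Int.toChars a ++ '-' :: '>' :: PySem.Int.toChars b := by
    simp [rawRange, pyCat, PySem.Int.toList_toStr]
  have hsplit : PySem.Str.split? (rawRange a b) "->" =
      some [String.ofList (PySem.Int.toChars a), String.ofList (PySem.Int.toChars b)] := by
    unfold PySem.Str.split?
    rw [htl]
    have : "->".toList = ['-', '>'] := by decide
    rw [this]
    unfold PySem.Chars.split?
    rw [if_neg (by decide)]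
    rw [splitOn_clean _ _ (gt_not_mem_toChars a) (gt_not_mem_toChars b)]
    rfl
  unfold sanOne
  rw [hsplit]
  have h0 : PySem.List.pyGetD [String.ofList (PySem.Int.toChars a), String.ofList (PySem.Int.toChars b)] 0 "" = String.ofList (PySem.Int.toChars a) := by simp [pysem]
  have h1 : PySem.List.pyGetD [String.ofList (PySem.Int.toChars a), String.ofList (PySem.Int.toChars b)] 1 "" = String.ofList (PySem.Int.toChars b) := by simp [pysem]
  simp only [Option.getD_some, h0, h1]
  by_cases hab : a = b
  · subst hab
    rw [if_pos rfl]
    simp [fmtRange, PySem.Int.toStr]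
  · rw [if_neg (by
      intro hxy
      exact hab (toChars_inj a b (String.ofList_inj.mp hxy)))]
    simp only [fmtRange, if_neg hab, rawRange, PySem.Int.toStr]

-- the missing stretches between consecutive kept values, in A's raw form and B's final form
def gapsRaw (prev : Int) : List Int → List String
  | [] => []
  | v :: t => (if v - prev > 1 then [rawRange (prev + 1) (v - 1)] else []) ++ gapsRaw v t

def gapsFmt (prev : Int) : List Int → List String
  | [] => []
  | v :: t => (if v - prev > 1 then [fmtRange (prev + 1) (v - 1)] else []) ++ gapsFmt v t

theorem sanitize_gapsRaw (l : List Int) : ∀ prev, (gapsRaw prev l).flatMap sanOne = gapsFmt prev l := by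
  induction l with
  | nil => intro prev; simp [gapsRaw, gapsFmt]
  | cons v t ih =>
    intro prev
    simp only [gapsRaw, gapsFmt, List.flatMap_append, ih]
    congr 1
    split <;> simp [sanOne_raw]

-- A's filtering loop is List.filter
theorem helpA (lower upper : Int) : ∀ (l : List Int) (acc : List Int),
    l.foldl (fun h i => if lower ≤ i ∧ i ≤ upper then h ++ [i] else h) acc
      = acc ++ l.filter (fun i => decide (lower ≤ i ∧ i ≤ upper)) := by
  intro l
  induction l with
  | nil => intro acc; simp
  | cons v t ih =>
    intro acc
    simp only [List.foldl_cons, List.filter_cons]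
    by_cases hv : lower ≤ v ∧ v ≤ upper
    · rw [if_pos hv, ih]
      simp [hv]
    · rw [if_neg hv, ih]
      simp [hv]

-- B's loop only acts on in-range elements, so it is a fold over the filtered list
theorem bFilter (lower upper : Int) (g : Int × List String → Int → Int × List String) :
    ∀ (l : List Int) (st : Int × List String),
      l.foldl (fun st v => if lower ≤ v ∧ v ≤ upper then g st v else st) st
        = (l.filter (fun i => decide (lower ≤ i ∧ i ≤ upper))).foldl g st := by
  intro l
  induction l with
  | nil => intro st; simp
  | cons v t ih =>
    intro st
    simp only [List.foldl_cons, List.filter_cons]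
    by_cases hv : lower ≤ v ∧ v ≤ upper
    · rw [if_pos hv, ih]
      simp [hv]
    · rw [if_neg hv, ih]
      simp [hv]

-- B's fold over the kept values: last value and the emitted stretches
theorem bFold : ∀ (l : List Int) (prev : Int) (out : List String),
    l.foldl (fun (st : Int × List String) v =>
        (v, if v - st.1 > 1 then st.2 ++ [fmtRange (st.1 + 1) (v - 1)] else st.2)) (prev, out)
      = (l.getLastD prev, out ++ gapsFmt prev l) := by
  intro l
  induction l with
  | nil => intro prev out; simp [gapsFmt]
  | cons v t ih =>
    intro prev out
    simp only [List.foldl_cons, List.getLastD_cons]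
    rw [ih]
    simp only [gapsFmt]
    congr 1
    split <;> simp

-- A's index loop over adjacent pairs of help_list
def stepA (xs : List Int) (res : List String) (i : Int) : List String :=
  if PySem.List.pyGetD xs i 0 - PySem.List.pyGetD xs (i - 1) 0 > 1 then
    res ++ [rawRange (PySem.List.pyGetD xs (i - 1) 0 + 1) (PySem.List.pyGetD xs i 0 - 1)]
  else res

theorem midLoop : ∀ (l pre : List Int) (prev : Int) (xs : List Int) (a : Int),
    xs = pre ++ prev :: l → a = pre.length →
    ∀ (res : List String),
      (PySem.List.pyRange (a + 1) (a + 1 + l.length) 1).foldl (stepA xs) res = res ++ gapsRaw prev l := by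
  intro l
  induction l with
  | nil =>
    intro pre prev xs a hxs ha res
    rw [PySem.List.pyRange_one_eq_nil (by simp)]
    simp [gapsRaw]
  | cons v t ih =>
    intro pre prev xs a hxs ha res
    have hv : PySem.List.pyGetD xs (a + 1) 0 = v := by
      have hcast : a + 1 = ((pre.length + 1 : Nat) : Int) := by omega
      rw [hcast, PySem.List.pyGetD_natCast, hxs, List.getD_eq_getElem?_getD,
        List.getElem?_append_right (by omega)]
      simp
    have hp : PySem.List.pyGetD xs (a + 1 - 1) 0 = prev := by
      have hcast : a + 1 - 1 = ((pre.length : Nat) : Int) := by omega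
      rw [hcast, PySem.List.pyGetD_natCast, hxs, List.getD_eq_getElem?_getD,
        List.getElem?_append_right (by omega)]
      simp
    have hend : a + 1 + ((v :: t).length : Int) = (a + 1) + 1 + (t.length : Int) := by
      push_cast [List.length_cons]; omega
    rw [hend, PySem.List.pyRange_one_cons (by omega)]
    simp only [List.foldl_cons]
    rw [ih (pre ++ [prev]) v xs (a + 1) (by rw [hxs]; simp) (by simp [ha])]
    have hstep : stepA xs res (a + 1) = res ++ (if v - prev > 1 then [rawRange (prev + 1) (v - 1)] else []) := by
      unfold stepA
      rw [hv, hp]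
      split <;> simp
    rw [hstep, List.append_assoc]
    rfl

theorem midLoop0 (h0 : Int) (t : List Int) (res : List String) :
    (PySem.List.pyRange 1 (PySem.List.len (h0 :: t)) 1).foldl (stepA (h0 :: t)) res = res ++ gapsRaw h0 t := by
  have h := midLoop t [] h0 (h0 :: t) 0 rfl (by simp) res
  have e2 : (0:Int) + 1 + (t.length : Int) = PySem.List.len (h0 :: t) := by
    rw [PySem.List.len_eq]; push_cast [List.length_cons]; omega
  rw [e2, show (0:Int) + 1 = 1 from by omega] at h
  exact h

-- the last kept value as A reads it: help_list[len(help_list)-1]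
theorem pyGetD_last (h0 : Int) (t : List Int) :
    PySem.List.pyGetD (h0 :: t) (PySem.List.len (h0 :: t) - 1) 0 = (h0 :: t).getLastD h0 := by
  have hcast : PySem.List.len (h0 :: t) - 1 = ((t.length : Nat) : Int) := by
    rw [PySem.List.len_eq]; push_cast [List.length_cons]; omega
  rw [hcast, PySem.List.pyGetD_natCast]
  induction t generalizing h0 with
  | nil => simp
  | cons v t ih => simpa using ih v

theorem getLastD_mem' : ∀ (l : List Int) (d : Int), l.getLastD d ∈ d :: l := by
  intro l
  induction l with
  | nil => intro d; simp
  | cons v t ih =>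
    intro d
    simp only [List.getLastD_cons]
    exact List.mem_cons_of_mem _ (ih v)

theorem getLastD_mem (h0 : Int) (t : List Int) : (h0 :: t).getLastD h0 ∈ h0 :: t := by
  rw [List.getLastD_cons]
  exact getLastD_mem' t h0

-- ===== VERDICT (by name: the statement is the Claim_ definition above) =====
theorem solve_spec : Claim_equal_solve := by
  intro input_list lower upper _
  unfold Spec_solve solve solve_alt
  have hA := helpA lower upper input_list []
  simp only [List.nil_append] at hA
  rw [hA, bFilter lower upper
    (fun st v => (v, if v - st.1 > 1 then st.2 ++ [fmtRange (st.1 + 1) (v - 1)] else st.2))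
    input_list ((lower - 1 : Int), ([] : List String)), bFold]
  cases hF : input_list.filter (fun i => decide (lower ≤ i ∧ i ≤ upper)) with
  | nil =>
    simp only [List.getLastD_nil, List.length_nil, gapsFmt]
    rw [sanitize_result_eq]
    simp [sanOne_raw]
  | cons h0 t =>
    have hmem : ∀ x ∈ h0 :: t, lower ≤ x ∧ x ≤ upper := by
      intro x hx
      have := List.of_mem_filter (hF ▸ hx)
      simpa using this
    simp only [List.length_cons, List.getLastD_cons, List.nil_append]
    rw [if_neg (by omega)]
    -- A's three pieces
    rw [PySem.List.pyGetD_zero_cons]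
    have hstep : (fun (res : List String) (i : Int) =>
        if PySem.List.pyGetD (h0 :: t) i 0 - PySem.List.pyGetD (h0 :: t) (i - 1) 0 > 1 then
          res ++ [rawRange (PySem.List.pyGetD (h0 :: t) (i - 1) 0 + 1) (PySem.List.pyGetD (h0 :: t) i 0 - 1)]
        else res) = stepA (h0 :: t) := rfl
    rw [hstep]
    rw [midLoop0, pyGetD_last, List.getLastD_cons]
    set L := t.getLastD h0 with hL
    have hLmem := getLastD_mem h0 t
    rw [List.getLastD_cons] at hLmem
    have hLlow : lower ≤ L := ((hmem L hLmem).1)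
    -- B side branch: L ≠ lower - 1
    rw [if_neg (by omega : ¬ L = lower - 1)]
    -- sanitize distributes
    rw [sanitize_result_eq]
    have seg1 : ((if h0 > lower then
        [rawRange lower (h0 - 1)] else []) : List String).flatMap sanOne
        = (if h0 - (lower - 1) > 1 then [fmtRange (lower - 1 + 1) (h0 - 1)] else []) := by
      by_cases hc : h0 > lower
      · rw [if_pos hc, if_pos (by omega)]
        simp [sanOne_raw]
      · rw [if_neg hc, if_neg (by omega)]
        simp
    rw [gapsFmt]
    split
    · rw [List.flatMap_append, List.flatMap_append, seg1, sanitize_gapsRaw]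
      simp [sanOne_raw, List.append_assoc]
    · rw [List.flatMap_append, seg1, sanitize_gapsRaw]
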